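-- pv_equiv track=rewrite | github.com/nikspatel007/rl-emails | src/parse_gmail_mbox.py | infer_folder_from_labels
-- ===== SOURCE A (Python) =====
-- def infer_folder_from_labels(labels: list[str]) -> str:
--     """Infer a folder name from Gmail labels for compatibility with label_actions.py.
--
--     Maps Gmail labels to folder names that label_actions.py understands:
--     - Sent/Sent Mail -> sent
--     - Trash -> deleted_items
--     - Inbox -> inbox
--     - Spam -> junk
--     - Other labels -> archived (user-created folders)
--
--     Args:
--         labels: List of Gmail labels
--
--     Returns:
--         Folder name compatible with label_actions.py
--     """
--     labels_lower = [l.lower() for l in labels]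
--
--     # Priority order for folder classification
--     if 'sent' in labels_lower or 'sent mail' in labels_lower:
--         return 'sent'
--     elif 'trash' in labels_lower:
--         return 'deleted_items'
--     elif 'spam' in labels_lower:
--         return 'junk'
--     elif 'inbox' in labels_lower:
--         return 'inbox'
--     elif 'drafts' in labels_lower:
--         return 'drafts'
--     elif 'important' in labels_lower:
--         # Important but not in specific folder -> treat as inbox
--         return 'inbox'
--     else:
--         # User-created labels = archived/project folders
--         # Pick the first non-system label
--         system_labels = {'opened', 'unread', 'starred', 'important',
--                         'category personal', 'category social',
--                         'category promotions', 'category updates',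
--                         'category forums', 'chats', 'archived'}
--         for label in labels:
--             if label.lower() not in system_labels:
--                 return label  # Use the label as folder name
--         return 'archived'
-- ===== SOURCE B (Python) =====
-- _RANK = {'sent': (0, 'sent'), 'sent mail': (0, 'sent'),
--          'trash': (1, 'deleted_items'), 'spam': (2, 'junk'),
--          'inbox': (3, 'inbox'), 'drafts': (4, 'drafts'),
--          'important': (5, 'inbox')}
--
-- _SYSTEM = frozenset({'opened', 'unread', 'starred', 'important',
--                      'category personal', 'category social',
--                      'category promotions', 'category updates',
--                      'category forums', 'chats', 'archived'})
--
--
-- def infer_folder_from_labels(labels: list[str]) -> str: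
--     # Single pass: keep the best (lowest) priority rank seen and its folder,
--     # and the first label whose lowercase form is not a system label.
--     best, folder, first_user = 6, None, None
--     for label in labels:
--         low = label.lower()
--         p, f = _RANK.get(low, (6, None))
--         if p < best:
--             best, folder = p, f
--         if first_user is None and low not in _SYSTEM:
--             first_user = label
--     if folder is not None:
--         return folder
--     if first_user is not None:
--         return first_user
--     return 'archived'
-- ===== Notes on version B (the rewrite author's own statement) =====
-- stated objective: alternative
-- what changed: A scans the lowercased list up to six times, one membership test per cascade branch, then re-scans for the fallback; B makes a single pass with an accumulator, folding each label to its priority rank/folder via one dict lookup while simultaneously recording the first non-system label, and decides once at the end from the minimal rank seen.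
import Mathlib
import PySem

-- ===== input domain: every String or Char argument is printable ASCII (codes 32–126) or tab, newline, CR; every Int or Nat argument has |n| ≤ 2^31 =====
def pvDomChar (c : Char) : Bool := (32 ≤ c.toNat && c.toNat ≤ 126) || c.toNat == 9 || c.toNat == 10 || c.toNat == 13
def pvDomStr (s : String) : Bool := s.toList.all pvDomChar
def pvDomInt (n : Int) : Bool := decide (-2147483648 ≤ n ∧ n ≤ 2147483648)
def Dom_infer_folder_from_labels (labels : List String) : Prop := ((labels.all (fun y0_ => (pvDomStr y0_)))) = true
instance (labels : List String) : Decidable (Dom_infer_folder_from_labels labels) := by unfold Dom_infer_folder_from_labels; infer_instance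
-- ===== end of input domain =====

-- B replaces A's multi-scan if/elif cascade by a SINGLE PASS: a fold that keeps the
-- lowest priority rank (and its folder) seen so far plus the first non-system label,
-- deciding once at the end.  Objective: alternative single-pass decomposition.

-- ===== PORT A =====

-- A's system_labels set literal (distinct elements, literal order)
def pvSystemLabelsA : PySem.Set String :=
  ["opened", "unread", "starred", "important",
   "category personal", "category social",
   "category promotions", "category updates",
   "category forums", "chats", "archived"]

-- A's final 'for label in labels' fallback loop
def pvFallA : List String → String
  | [] => "archived"
  | label :: rest =>
    if ¬ (pvSystemLabelsA.contains (PySem.Str.lower label)) then label else pvFallA rest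

def infer_folder_from_labels (labels : List String) : String :=
  let labels_lower := labels.map PySem.Str.lower
  if labels_lower.contains "sent" || labels_lower.contains "sent mail" then "sent"
  else if labels_lower.contains "trash" then "deleted_items"
  else if labels_lower.contains "spam" then "junk"
  else if labels_lower.contains "inbox" then "inbox"
  else if labels_lower.contains "drafts" then "drafts"
  else if labels_lower.contains "important" then "inbox"
  else pvFallA labels

-- ===== PORT B =====

-- B's _RANK dict literal: lowercase keyword -> (priority rank, folder)
def pvRankDict : PySem.Dict String (Int × Option String) :=
  PySem.Dict.mk
    [("sent", (0, some "sent")), ("sent mail", (0, some "sent")),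
     ("trash", (1, some "deleted_items")), ("spam", (2, some "junk")),
     ("inbox", (3, some "inbox")), ("drafts", (4, some "drafts")),
     ("important", (5, some "inbox"))]

-- B's _SYSTEM frozenset literal
def pvSystemB : PySem.Set String :=
  ["opened", "unread", "starred", "important",
   "category personal", "category social",
   "category promotions", "category updates",
   "category forums", "chats", "archived"]

-- one iteration of B's loop body over the state (best, folder, first_user)
def pvStepB (st : Int × Option String × Option String) (label : String) :
    Int × Option String × Option String :=
  let low := PySem.Str.lower label
  let pf := PySem.Dict.getD pvRankDict low ((6 : Int), none)
  let bf : Int × Option String := if pf.1 < st.1 then pf else (st.1, st.2.1)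
  let fu : Option String :=
    match st.2.2 with
    | some x => some x
    | none => if pvSystemB.contains low then none else some label
  (bf.1, bf.2, fu)

def infer_folder_from_labels_alt (labels : List String) : String :=
  let st := labels.foldl pvStepB ((6 : Int), none, none)
  match st.2.1 with
  | some f => f
  | none =>
    match st.2.2 with
    | some l => l
    | none => "archived"

-- ===== PRECONDITION & SPEC =====
def Spec_infer_folder_from_labels (labels : List String) (out : String) : Prop := out = infer_folder_from_labels_alt labels
instance (labels : List String) (out : String) : Decidable (Spec_infer_folder_from_labels labels out) := by unfold Spec_infer_folder_from_labels; infer_instance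

-- ===== CLAIM (what is proved, stated in full; the proofs are below) =====
def Claim_equal_infer_folder_from_labels : Prop := ∀ (labels : List String), Dom_infer_folder_from_labels labels → Spec_infer_folder_from_labels labels (infer_folder_from_labels labels)

-- ===== LEMMAS AND PROOFS =====

-- the rank lookup, spelled out
theorem pvRank_eq (s : String) :
    PySem.Dict.getD pvRankDict s ((6 : Int), none) =
      if s = "sent" ∨ s = "sent mail" then (0, some "sent")
      else if s = "trash" then (1, some "deleted_items")
      else if s = "spam" then (2, some "junk")
      else if s = "inbox" then (3, some "inbox")
      else if s = "drafts" then (4, some "drafts")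
      else if s = "important" then (5, some "inbox")
      else (6, none) := by
  simp only [pvRankDict, PySem.Dict.getD_eq_get?_getD, PySem.Dict.get?_mk_cons, beq_iff_eq]
  by_cases h1 : "sent" = s <;> by_cases h2 : "sent mail" = s <;>
  by_cases h3 : "trash" = s <;> by_cases h4 : "spam" = s <;>
  by_cases h5 : "inbox" = s <;> by_cases h6 : "drafts" = s <;>
  by_cases h7 : "important" = s <;>
  simp_all [eq_comm, PySem.Dict.get?]

-- spec of the first-user component of B's state
def pvFirstUser : List String → Option String
  | [] => none
  | l :: rest =>
    if pvSystemB.contains (PySem.Str.lower l) then pvFirstUser rest else some l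

theorem pvLoop_fu (labels : List String) :
    ∀ st : Int × Option String × Option String,
      (labels.foldl pvStepB st).2.2 =
        match st.2.2 with
        | some x => some x
        | none => pvFirstUser labels := by
  induction labels with
  | nil => intro st; cases h : st.2.2 <;> simp [h, pvFirstUser]
  | cons l rest ih =>
    intro st
    simp only [List.foldl_cons, ih, pvStepB, pvFirstUser]
    cases h : st.2.2 <;> simp only [h] <;> split_ifs <;> rfl

theorem pvFallA_eq (labels : List String) :
    pvFallA labels =
      match pvFirstUser labels with
      | some l => l
      | none => "archived" := by
  induction labels with
  | nil => rfl
  | cons l rest ih =>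
    simp only [pvFallA, pvFirstUser, pvSystemLabelsA, pvSystemB]
    split_ifs with h <;> simp_all

-- invariant of the (best, folder) components of B's fold
theorem pvLoop_bf (labels : List String) :
    ∀ st : Int × Option String × Option String,
      (∀ l ∈ labels,
          (labels.foldl pvStepB st).1 ≤
            (PySem.Dict.getD pvRankDict (PySem.Str.lower l) ((6 : Int), none)).1) ∧
      (labels.foldl pvStepB st).1 ≤ st.1 ∧
      (((labels.foldl pvStepB st).1 = st.1 ∧ (labels.foldl pvStepB st).2.1 = st.2.1) ∨
        ∃ l ∈ labels,
          ((labels.foldl pvStepB st).1, (labels.foldl pvStepB st).2.1) =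
            PySem.Dict.getD pvRankDict (PySem.Str.lower l) ((6 : Int), none)) := by
  induction labels with
  | nil => intro st; simp
  | cons l rest ih =>
    intro st
    obtain ⟨ih1, ih2, ih3⟩ := ih (pvStepB st l)
    simp only [List.foldl_cons]
    refine ⟨?_, ?_, ?_⟩
    · intro x hx
      rcases List.mem_cons.mp hx with hx | hx
      · subst hx
        refine le_trans ih2 ?_
        simp only [pvStepB]
        split_ifs with h <;> omega
      · exact ih1 x hx
    · refine le_trans ih2 ?_
      simp only [pvStepB]
      split_ifs with h <;> omega
    · rcases ih3 with ⟨h1, h2⟩ | ⟨x, hx, hpair⟩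
      · by_cases h : (PySem.Dict.getD pvRankDict (PySem.Str.lower l) ((6 : Int), none)).1 < st.1
        · right
          refine ⟨l, by simp, ?_⟩
          rw [h1, h2]
          simp only [pvStepB]
          rw [if_pos h]
        · left
          rw [h1, h2]
          simp only [pvStepB]
          rw [if_neg h]
          exact ⟨rfl, rfl⟩
      · right
        exact ⟨x, by simp [hx], hpair⟩

-- exhaustive case analysis of the rank lookup
theorem pvRank_cases (s : String) :
    ((s = "sent" ∨ s = "sent mail") ∧ PySem.Dict.getD pvRankDict s ((6 : Int), none) = (0, some "sent")) ∨
    (s = "trash" ∧ PySem.Dict.getD pvRankDict s ((6 : Int), none) = (1, some "deleted_items")) ∨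
    (s = "spam" ∧ PySem.Dict.getD pvRankDict s ((6 : Int), none) = (2, some "junk")) ∨
    (s = "inbox" ∧ PySem.Dict.getD pvRankDict s ((6 : Int), none) = (3, some "inbox")) ∨
    (s = "drafts" ∧ PySem.Dict.getD pvRankDict s ((6 : Int), none) = (4, some "drafts")) ∨
    (s = "important" ∧ PySem.Dict.getD pvRankDict s ((6 : Int), none) = (5, some "inbox")) ∨
    PySem.Dict.getD pvRankDict s ((6 : Int), none) = (6, none) := by
  rw [pvRank_eq]
  split_ifs with h1 h2 h3 h4 h5 h6 <;> tauto

theorem pvRank_nonneg (s : String) :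
    0 ≤ (PySem.Dict.getD pvRankDict s ((6 : Int), none)).1 := by
  rw [pvRank_eq]; split_ifs <;> norm_num

-- if some label attains rank k < 6 and none beats it, B's folder component is f
theorem pv_state_folder (labels : List String) (k : Int) (f : String)
    (hset : ∃ l ∈ labels, (PySem.Dict.getD pvRankDict (PySem.Str.lower l) ((6 : Int), none)).1 = k)
    (hmin : ∀ l ∈ labels, k ≤ (PySem.Dict.getD pvRankDict (PySem.Str.lower l) ((6 : Int), none)).1)
    (hk : k < 6)
    (hfold : ∀ s, (PySem.Dict.getD pvRankDict s ((6 : Int), none)).1 = k →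
        PySem.Dict.getD pvRankDict s ((6 : Int), none) = (k, some f)) :
    (labels.foldl pvStepB ((6 : Int), none, none)).2.1 = some f := by
  obtain ⟨hub, _, hdisj⟩ := pvLoop_bf labels ((6 : Int), none, none)
  obtain ⟨l0, hl0, hr0⟩ := hset
  have h1 : (labels.foldl pvStepB ((6 : Int), none, none)).1 ≤ k := hr0 ▸ hub l0 hl0
  rcases hdisj with ⟨h6, _⟩ | ⟨l1, hl1, hpair⟩
  · simp only at h6; omega
  · have hge := hmin l1 hl1
    have hfst : (PySem.Dict.getD pvRankDict (PySem.Str.lower l1) ((6 : Int), none)).1 = k := by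
      have := congrArg Prod.fst hpair
      simp only at this
      omega
    rw [hfold _ hfst] at hpair
    exact (Prod.mk.injEq _ _ _ _ ▸ hpair).2

-- ===== VERDICT (by name: the statement is the Claim_ definition above) =====
theorem infer_folder_from_labels_spec : Claim_equal_infer_folder_from_labels := by
  intro labels _
  unfold Spec_infer_folder_from_labels infer_folder_from_labels infer_folder_from_labels_alt
  simp only [List.contains_iff_mem, Bool.or_eq_true, List.mem_map]
  have hfu := pvLoop_fu labels ((6 : Int), none, none)
  simp only at hfu
  by_cases c1 : (∃ l ∈ labels, PySem.Str.lower l = "sent") ∨ (∃ l ∈ labels, PySem.Str.lower l = "sent mail")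
  · have hf : (labels.foldl pvStepB ((6 : Int), none, none)).2.1 = some "sent" := by
      apply pv_state_folder labels 0 "sent"
      · rcases c1 with ⟨l, hl, he⟩ | ⟨l, hl, he⟩ <;> exact ⟨l, hl, by rw [he]; decide⟩
      · exact fun l hl => pvRank_nonneg _
      · norm_num
      · intro s hs
        rcases pvRank_cases s with ⟨_, he⟩ | ⟨_, he⟩ | ⟨_, he⟩ | ⟨_, he⟩ | ⟨_, he⟩ | ⟨_, he⟩ | he <;>
          rw [he] <;> rw [he] at hs <;> simp_all
    simp only [if_pos c1, hf]
  · by_cases c2 : ∃ l ∈ labels, PySem.Str.lower l = "trash"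
    · have hf : (labels.foldl pvStepB ((6 : Int), none, none)).2.1 = some "deleted_items" := by
        apply pv_state_folder labels 1 "deleted_items"
        · obtain ⟨l, hl, he⟩ := c2; exact ⟨l, hl, by rw [he]; decide⟩
        · intro l hl
          rcases pvRank_cases (PySem.Str.lower l) with ⟨hk, he⟩ | ⟨_, he⟩ | ⟨_, he⟩ | ⟨_, he⟩ | ⟨_, he⟩ | ⟨_, he⟩ | he <;> rw [he]
          · exact absurd (hk.elim (fun h => Or.inl ⟨l, hl, h⟩) (fun h => Or.inr ⟨l, hl, h⟩)) c1
          all_goals norm_num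
        · norm_num
        · intro s hs
          rcases pvRank_cases s with ⟨_, he⟩ | ⟨_, he⟩ | ⟨_, he⟩ | ⟨_, he⟩ | ⟨_, he⟩ | ⟨_, he⟩ | he <;>
            rw [he] <;> rw [he] at hs <;> simp_all
      simp only [if_neg c1, if_pos c2, hf]
    · by_cases c3 : ∃ l ∈ labels, PySem.Str.lower l = "spam"
      · have hf : (labels.foldl pvStepB ((6 : Int), none, none)).2.1 = some "junk" := by
          apply pv_state_folder labels 2 "junk"
          · obtain ⟨l, hl, he⟩ := c3; exact ⟨l, hl, by rw [he]; decide⟩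
          · intro l hl
            rcases pvRank_cases (PySem.Str.lower l) with ⟨hk, he⟩ | ⟨hk, he⟩ | ⟨_, he⟩ | ⟨_, he⟩ | ⟨_, he⟩ | ⟨_, he⟩ | he <;> rw [he]
            · exact absurd (hk.elim (fun h => Or.inl ⟨l, hl, h⟩) (fun h => Or.inr ⟨l, hl, h⟩)) c1
            · exact absurd ⟨l, hl, hk⟩ c2
            all_goals norm_num
          · norm_num
          · intro s hs
            rcases pvRank_cases s with ⟨_, he⟩ | ⟨_, he⟩ | ⟨_, he⟩ | ⟨_, he⟩ | ⟨_, he⟩ | ⟨_, he⟩ | he <;>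
              rw [he] <;> rw [he] at hs <;> simp_all
        simp only [if_neg c1, if_neg c2, if_pos c3, hf]
      · by_cases c4 : ∃ l ∈ labels, PySem.Str.lower l = "inbox"
        · have hf : (labels.foldl pvStepB ((6 : Int), none, none)).2.1 = some "inbox" := by
            apply pv_state_folder labels 3 "inbox"
            · obtain ⟨l, hl, he⟩ := c4; exact ⟨l, hl, by rw [he]; decide⟩
            · intro l hl
              rcases pvRank_cases (PySem.Str.lower l) with ⟨hk, he⟩ | ⟨hk, he⟩ | ⟨hk, he⟩ | ⟨_, he⟩ | ⟨_, he⟩ | ⟨_, he⟩ | he <;> rw [he]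
              · exact absurd (hk.elim (fun h => Or.inl ⟨l, hl, h⟩) (fun h => Or.inr ⟨l, hl, h⟩)) c1
              · exact absurd ⟨l, hl, hk⟩ c2
              · exact absurd ⟨l, hl, hk⟩ c3
              all_goals norm_num
            · norm_num
            · intro s hs
              rcases pvRank_cases s with ⟨_, he⟩ | ⟨_, he⟩ | ⟨_, he⟩ | ⟨_, he⟩ | ⟨_, he⟩ | ⟨_, he⟩ | he <;>
                rw [he] <;> rw [he] at hs <;> simp_all
          simp only [if_neg c1, if_neg c2, if_neg c3, if_pos c4, hf]
        · by_cases c5 : ∃ l ∈ labels, PySem.Str.lower l = "drafts"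
          · have hf : (labels.foldl pvStepB ((6 : Int), none, none)).2.1 = some "drafts" := by
              apply pv_state_folder labels 4 "drafts"
              · obtain ⟨l, hl, he⟩ := c5; exact ⟨l, hl, by rw [he]; decide⟩
              · intro l hl
                rcases pvRank_cases (PySem.Str.lower l) with ⟨hk, he⟩ | ⟨hk, he⟩ | ⟨hk, he⟩ | ⟨hk, he⟩ | ⟨_, he⟩ | ⟨_, he⟩ | he <;> rw [he]
                · exact absurd (hk.elim (fun h => Or.inl ⟨l, hl, h⟩) (fun h => Or.inr ⟨l, hl, h⟩)) c1
                · exact absurd ⟨l, hl, hk⟩ c2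
                · exact absurd ⟨l, hl, hk⟩ c3
                · exact absurd ⟨l, hl, hk⟩ c4
                all_goals norm_num
              · norm_num
              · intro s hs
                rcases pvRank_cases s with ⟨_, he⟩ | ⟨_, he⟩ | ⟨_, he⟩ | ⟨_, he⟩ | ⟨_, he⟩ | ⟨_, he⟩ | he <;>
                  rw [he] <;> rw [he] at hs <;> simp_all
            simp only [if_neg c1, if_neg c2, if_neg c3, if_neg c4, if_pos c5, hf]
          · by_cases c6 : ∃ l ∈ labels, PySem.Str.lower l = "important"
            · have hf : (labels.foldl pvStepB ((6 : Int), none, none)).2.1 = some "inbox" := by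
                apply pv_state_folder labels 5 "inbox"
                · obtain ⟨l, hl, he⟩ := c6; exact ⟨l, hl, by rw [he]; decide⟩
                · intro l hl
                  rcases pvRank_cases (PySem.Str.lower l) with ⟨hk, he⟩ | ⟨hk, he⟩ | ⟨hk, he⟩ | ⟨hk, he⟩ | ⟨hk, he⟩ | ⟨_, he⟩ | he <;> rw [he]
                  · exact absurd (hk.elim (fun h => Or.inl ⟨l, hl, h⟩) (fun h => Or.inr ⟨l, hl, h⟩)) c1
                  · exact absurd ⟨l, hl, hk⟩ c2
                  · exact absurd ⟨l, hl, hk⟩ c3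
                  · exact absurd ⟨l, hl, hk⟩ c4
                  · exact absurd ⟨l, hl, hk⟩ c5
                  all_goals norm_num
                · norm_num
                · intro s hs
                  rcases pvRank_cases s with ⟨_, he⟩ | ⟨_, he⟩ | ⟨_, he⟩ | ⟨_, he⟩ | ⟨_, he⟩ | ⟨_, he⟩ | he <;>
                    rw [he] <;> rw [he] at hs <;> simp_all
              simp only [if_neg c1, if_neg c2, if_neg c3, if_neg c4, if_neg c5, if_pos c6, hf]
            · -- no keyword at all: folder stays none, both fall back to the first non-system label
              have hnone : (labels.foldl pvStepB ((6 : Int), none, none)).2.1 = none := by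
                obtain ⟨_, _, hdisj⟩ := pvLoop_bf labels ((6 : Int), none, none)
                rcases hdisj with ⟨_, h2⟩ | ⟨l1, hl1, hpair⟩
                · exact h2
                · rcases pvRank_cases (PySem.Str.lower l1) with ⟨hk, he⟩ | ⟨hk, he⟩ | ⟨hk, he⟩ | ⟨hk, he⟩ | ⟨hk, he⟩ | ⟨hk, he⟩ | he
                  · exact absurd (hk.elim (fun h => Or.inl ⟨l1, hl1, h⟩) (fun h => Or.inr ⟨l1, hl1, h⟩)) c1
                  · exact absurd ⟨l1, hl1, hk⟩ c2
                  · exact absurd ⟨l1, hl1, hk⟩ c3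
                  · exact absurd ⟨l1, hl1, hk⟩ c4
                  · exact absurd ⟨l1, hl1, hk⟩ c5
                  · exact absurd ⟨l1, hl1, hk⟩ c6
                  · rw [he] at hpair
                    exact (Prod.mk.injEq _ _ _ _ ▸ hpair).2
              simp only [if_neg c1, if_neg c2, if_neg c3, if_neg c4, if_neg c5, if_neg c6,
                hnone, hfu, pvFallA_eq]
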